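-- pv_equiv track=rewrite | github.com/Amirreza-0/PMBind | src/utils.py | determine_conv_params
-- ===== SOURCE A (Python) =====
-- def determine_conv_params(input_dim, output_dim, max_kernel_size=5, max_strides=2):
--     """
--     Determine kernel size and strides for a single Conv1D layer.
--
--     Args:
--         input_dim (int): Input sequence length.
--         output_dim (int): Desired output sequence length.
--         max_kernel_size (int): Maximum allowed kernel size.
--         max_strides (int): Maximum allowed strides.
--
--     Returns:
--         tuple: (kernel_size, strides) if found, else None.
--     """
--     candidates = []
--     for strides in range(1, max_strides + 1):
--         for kernel_size in range(1, max_kernel_size + 1):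
--             if (input_dim - kernel_size) // strides + 1 == output_dim:
--                 candidates.append((kernel_size, strides))
--     if candidates:
--         candidates.sort(key=lambda x: (x[1], x[0]))  # Prefer smaller strides, then kernel size
--         return candidates[0]
--     return None
-- ===== SOURCE B (Python) =====
-- def determine_conv_params(input_dim, output_dim, max_kernel_size=5, max_strides=2):
--     # For stride s > 0, (input_dim - k)//s + 1 == output_dim holds exactly for
--     # kernel sizes k in the interval [lo, hi]; pick the smallest admissible one
--     # directly instead of scanning all kernel sizes.
--     for s in range(1, max_strides + 1):
--         lo = input_dim - s * output_dim + 1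
--         hi = input_dim - s * (output_dim - 1)
--         k = max(1, lo)
--         if k <= min(max_kernel_size, hi):
--             return (k, s)
--     return None
-- ===== Notes on version B (the rewrite author's own statement) =====
-- stated objective: alternative
-- what changed: B eliminates the inner kernel-size scan (and A's candidate list and sort) entirely: for each stride s it solves the floor-division equation in closed form, computing the interval [lo, hi] of valid kernel sizes and returning (max(1, lo), s) for the first stride whose interval meets [1, max_kernel_size].
import Mathlib
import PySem

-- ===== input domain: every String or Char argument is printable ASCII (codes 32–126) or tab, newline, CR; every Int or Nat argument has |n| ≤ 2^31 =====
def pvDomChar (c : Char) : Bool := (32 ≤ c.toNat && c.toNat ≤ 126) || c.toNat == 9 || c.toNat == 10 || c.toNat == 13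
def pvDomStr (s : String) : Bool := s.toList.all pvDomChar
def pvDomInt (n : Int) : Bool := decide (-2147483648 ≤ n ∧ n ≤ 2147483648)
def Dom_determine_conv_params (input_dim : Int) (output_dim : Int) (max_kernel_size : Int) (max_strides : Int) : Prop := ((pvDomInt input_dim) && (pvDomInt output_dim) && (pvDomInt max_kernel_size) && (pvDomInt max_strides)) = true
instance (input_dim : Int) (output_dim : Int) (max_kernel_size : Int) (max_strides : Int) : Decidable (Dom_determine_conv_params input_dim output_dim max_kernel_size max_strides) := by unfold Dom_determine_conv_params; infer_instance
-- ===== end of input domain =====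

-- B removes A's inner kernel scan, candidate list and sort: for each stride it solves the
-- floor-division equation in closed form for the interval of valid kernel sizes (objective: alternative).

-- ===== PORT A =====
def determine_conv_params (input_dim : Int) (output_dim : Int) (max_kernel_size : Int) (max_strides : Int) : Option (Int × Int) :=
  let candidates : List (Int × Int) :=
    (PySem.List.pyRange 1 (max_strides + 1) 1).foldl (fun acc strides =>
      (PySem.List.pyRange 1 (max_kernel_size + 1) 1).foldl (fun acc2 kernel_size =>
        if PySem.Int.floordiv (input_dim - kernel_size) strides + 1 == output_dim then
          acc2 ++ [(kernel_size, strides)]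
        else acc2) acc) []
  if candidates.isEmpty then none
  else
    -- candidates.sort(key=lambda x: (x[1], x[0])); return candidates[0]
    PySem.List.pyGet? (PySem.List.sorted2 candidates (fun x => x.2) (fun x => x.1)) 0

-- ===== PORT B =====
def determine_conv_params_alt (input_dim : Int) (output_dim : Int) (max_kernel_size : Int) (max_strides : Int) : Option (Int × Int) :=
  (PySem.List.pyRange 1 (max_strides + 1) 1).findSome? (fun s =>
    let lo := input_dim - s * output_dim + 1
    let hi := input_dim - s * (output_dim - 1)
    let k := max 1 lo
    if k ≤ min max_kernel_size hi then some (k, s) else none)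

-- ===== PRECONDITION & SPEC =====
def Spec_determine_conv_params (input_dim : Int) (output_dim : Int) (max_kernel_size : Int) (max_strides : Int) (out : Option (Int × Int)) : Prop := out = determine_conv_params_alt input_dim output_dim max_kernel_size max_strides
instance (input_dim : Int) (output_dim : Int) (max_kernel_size : Int) (max_strides : Int) (out : Option (Int × Int)) : Decidable (Spec_determine_conv_params input_dim output_dim max_kernel_size max_strides out) := by unfold Spec_determine_conv_params; infer_instance

-- ===== CLAIM (what is proved, stated in full; the proofs are below) =====
def Claim_equal_determine_conv_params : Prop := ∀ (input_dim : Int) (output_dim : Int) (max_kernel_size : Int) (max_strides : Int), Dom_determine_conv_params input_dim output_dim max_kernel_size max_strides → Spec_determine_conv_params input_dim output_dim max_kernel_size max_strides (determine_conv_params input_dim output_dim max_kernel_size max_strides)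

-- ===== LEMMAS AND PROOFS =====

-- the strict (strides, kernel) lexicographic order A sorts by
def pvLexLt (a b : Int × Int) : Prop := a.2 < b.2 ∨ (a.2 = b.2 ∧ a.1 < b.1)

-- sorted2 with keys (x.2, x.1) leaves a list alone when it is already strictly
-- increasing in that lexicographic order: every insertBy lands at the end.
theorem pv_foldl_insertBy_eq_append (before : Int × Int → Int × Int → Bool)
    (hb : ∀ a b, pvLexLt b a → before a b = false) :
    ∀ (xs acc : List (Int × Int)), (∀ a ∈ acc, ∀ x ∈ xs, pvLexLt a x) →
      List.Pairwise pvLexLt xs →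
      xs.foldl (fun acc x => PySem.List.insertBy before x acc) acc = acc ++ xs := by
  intro xs
  induction xs with
  | nil => intro acc _ _; simp
  | cons x t ih =>
    intro acc hax hp
    have h1 : PySem.List.insertBy before x acc = acc ++ [x] :=
      PySem.List.insertBy_of_forall_not_before _ _ _
        (fun y hy => hb _ _ (hax y hy x (by simp)))
    simp only [List.foldl_cons, h1]
    rw [ih (acc ++ [x])]
    · simp
    · intro a ha z hz
      rcases List.mem_append.1 ha with h | h
      · exact hax a h z (List.mem_cons_of_mem _ hz)
      · simp at h; subst h
        exact (List.pairwise_cons.1 hp).1 z hz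
    · exact (List.pairwise_cons.1 hp).2

theorem pv_sorted2_eq_self (xs : List (Int × Int)) (hp : List.Pairwise pvLexLt xs) :
    PySem.List.sorted2 xs (fun x => x.2) (fun x => x.1) = xs := by
  show xs.foldl (fun acc x => PySem.List.insertBy _ x acc) [] = xs
  rw [pv_foldl_insertBy_eq_append _ _ xs [] (by simp) hp]
  · simp
  · intro a b hlt
    rcases hlt with h | ⟨he, h⟩ <;> simp <;> omega

-- first element of a flatMap is the first stride whose inner scan hits
theorem pv_head?_flatMap (l : List Int) (g : Int → List (Int × Int)) :
    (l.flatMap g).head? = l.findSome? (fun x => (g x).head?) := by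
  induction l with
  | nil => simp
  | cons x t ih =>
    simp only [List.flatMap_cons, List.head?_append, List.findSome?_cons, ih]
    cases (g x).head? <;> simp

-- findSome? only depends on the function's values on members
theorem pv_findSome?_congr {α : Type} (l : List Int) (f g : Int → Option α)
    (h : ∀ x ∈ l, f x = g x) : l.findSome? f = l.findSome? g := by
  induction l with
  | nil => rfl
  | cons x t ih =>
    simp only [List.findSome?_cons, h x (by simp)]
    cases g x with
    | none => exact ih (fun y hy => h y (by simp [hy]))
    | some v => rfl

-- first element of range [a, b) surviving an interval filter, in closed form
theorem pv_head?_filter_interval :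
    ∀ (n : Nat) (a b L H : Int), (b - a).toNat = n →
      ((PySem.List.pyRange a b 1).filter (fun k => decide (L ≤ k ∧ k ≤ H))).head?
        = if max a L ≤ min (b - 1) H then some (max a L) else none := by
  intro n
  induction n with
  | zero =>
    intro a b L H hn
    rw [PySem.List.pyRange_one_eq_nil (by omega)]
    simp only [List.filter_nil, List.head?_nil]
    rw [if_neg (by omega)]
  | succ m ih =>
    intro a b L H hn
    rw [PySem.List.pyRange_one_cons (by omega), List.filter_cons]
    by_cases h : L ≤ a ∧ a ≤ H
    · rw [if_pos (by simpa using h)]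
      simp only [List.head?_cons]
      rw [if_pos (by omega)]
      congr 1
      omega
    · rw [if_neg (by simpa using h)]
      rw [ih (a + 1) b L H (by omega)]
      rcases not_and_or.1 h with h1 | h2
      · have e : max (a + 1) L = max a L := by omega
        rw [e]
      · rw [if_neg (by omega), if_neg (by omega)]

-- ===== VERDICT (by name: the statement is the Claim_ definition above) =====
theorem determine_conv_params_spec : Claim_equal_determine_conv_params := by
  intro input_dim output_dim max_kernel_size max_strides _
  unfold Spec_determine_conv_params determine_conv_params determine_conv_params_alt
  set S := PySem.List.pyRange 1 (max_strides + 1) 1 with hS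
  set K := PySem.List.pyRange 1 (max_kernel_size + 1) 1 with hK
  have hcand :
      S.foldl (fun acc strides =>
        K.foldl (fun acc2 kernel_size =>
          if PySem.Int.floordiv (input_dim - kernel_size) strides + 1 == output_dim then
            acc2 ++ [(kernel_size, strides)]
          else acc2) acc) []
      = S.flatMap (fun s =>
          (K.filter (fun k => PySem.Int.floordiv (input_dim - k) s + 1 == output_dim)).map
            (fun k => (k, s))) := by
    rw [PySem.List.foldl_congr_mem S _
      (fun acc s => acc ++
        (K.filter (fun k => PySem.Int.floordiv (input_dim - k) s + 1 == output_dim)).map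
          (fun k => (k, s))) []
      (fun acc s _ => PySem.List.foldl_append_if _ _ _ _),
      PySem.List.foldl_append_eq_flatMap]
    simp
  rw [hcand]
  set L := S.flatMap (fun s =>
          (K.filter (fun k => PySem.Int.floordiv (input_dim - k) s + 1 == output_dim)).map
            (fun k => (k, s))) with hL
  have hpair : List.Pairwise pvLexLt L := by
    rw [hL, List.pairwise_flatMap]
    constructor
    · intro s _
      rw [List.pairwise_map]
      exact ((PySem.List.pairwise_lt_pyRange_one 1 (max_kernel_size + 1)).filter _).imp
        (fun h => Or.inr ⟨rfl, h⟩)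
    · refine (PySem.List.pairwise_lt_pyRange_one 1 (max_strides + 1)).imp_of_mem ?_
      intro s1 s2 _ _ hlt x hx y hy
      simp only [List.mem_map] at hx hy
      obtain ⟨k1, _, rfl⟩ := hx
      obtain ⟨k2, _, rfl⟩ := hy
      exact Or.inl hlt
  have hAhead :
      (if L.isEmpty then (none : Option (Int × Int))
       else PySem.List.pyGet? (PySem.List.sorted2 L (fun x => x.2) (fun x => x.1)) 0)
      = L.head? := by
    rw [pv_sorted2_eq_self L hpair]
    cases L with
    | nil => simp
    | cons a t => simp
  rw [hAhead, hL, pv_head?_flatMap]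
  apply pv_findSome?_congr
  intro s hs
  have hs1 : 1 ≤ s := ((PySem.List.mem_pyRange_one).1 hs).1
  have hpred : (fun k => PySem.Int.floordiv (input_dim - k) s + 1 == output_dim)
      = (fun k => decide (input_dim - s * output_dim + 1 ≤ k ∧ k ≤ input_dim - s * (output_dim - 1))) := by
    funext k
    rw [Bool.eq_iff_iff]
    simp only [beq_iff_eq, decide_eq_true_eq]
    have hstep : PySem.Int.floordiv (input_dim - k) s + 1 = output_dim
        ↔ PySem.Int.floordiv (input_dim - k) s = output_dim - 1 := by omega
    rw [hstep, PySem.Int.floordiv_eq_iff_of_pos (by omega)]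
    have e1 : (output_dim - 1) * s = s * output_dim - s := by ring
    have e2 : (output_dim - 1 + 1) * s = s * output_dim := by ring
    have e3 : s * (output_dim - 1) = s * output_dim - s := by ring
    rw [e1, e2, e3]
    constructor <;> rintro ⟨h1, h2⟩ <;> exact ⟨by linarith, by linarith⟩
  rw [hpred, List.head?_map,
    pv_head?_filter_interval (max_kernel_size + 1 - 1).toNat 1 (max_kernel_size + 1) _ _ rfl]
  simp only [add_sub_cancel_right]
  by_cases hc : max 1 (input_dim - s * output_dim + 1)
      ≤ min max_kernel_size (input_dim - s * (output_dim - 1))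
  · rw [if_pos hc, if_pos hc]
    rfl
  · rw [if_neg hc, if_neg hc]
    rfl
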